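-- pv_equiv track=rewrite | github.com/ikinustaT/iKARMA | ikarma/core/context_aware_detection.py | is_legitimate_port_io
-- ===== SOURCE A (Python) =====
-- from typing import Optional, Dict, Tuple, Set
--
-- LEGITIMATE_PORT_RANGES = {
--     # Legacy hardware (less common in modern systems but legitimate)
--     (0x0000, 0x00FF): ("Legacy DMA/PIC/PIT", ["Microsoft", "WHQL"]),
--     (0x0170, 0x0177): ("Secondary ATA", ["Microsoft", "WHQL"]),
--     (0x01F0, 0x01F7): ("Primary ATA", ["Microsoft", "WHQL"]),
--     (0x0278, 0x027F): ("Parallel port 2", ["Microsoft", "WHQL"]),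
--     (0x02F8, 0x02FF): ("Serial port 2", ["Microsoft", "WHQL"]),
--     (0x0378, 0x037F): ("Parallel port 1", ["Microsoft", "WHQL"]),
--     (0x03F8, 0x03FF): ("Serial port 1", ["Microsoft", "WHQL"]),
--
--     # PCI configuration
--     (0x0CF8, 0x0CFF): ("PCI configuration", ["Microsoft", "WHQL"]),
--
--     # ACPI/Power management
--     (0x0400, 0x04FF): ("ACPI PM", ["Microsoft", "WHQL"]),
--     (0x0500, 0x05FF): ("GPIO/ACPI", ["Microsoft", "WHQL"]),
-- }
--
-- def is_legitimate_port_io(port: int, is_microsoft_signed: bool, is_whql_signed: bool) -> Tuple[bool, str]: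
--     """
--     Determine if port I/O access is legitimate.
--
--     Args:
--         port: Port number being accessed
--         is_microsoft_signed: True if Microsoft-signed
--         is_whql_signed: True if WHQL-signed
--
--     Returns:
--         Tuple of (is_legitimate, reason_string)
--     """
--     for (start, end), (desc, allowed_signers) in LEGITIMATE_PORT_RANGES.items():
--         if start <= port <= end:
--             if is_microsoft_signed and "Microsoft" in allowed_signers:
--                 return (True, f"Microsoft driver accessing {desc} port 0x{port:X}")
--             if is_whql_signed and "WHQL" in allowed_signers:
--                 return (True, f"WHQL driver accessing {desc} port 0x{port:X}")
--             return (False, f"Untrusted driver accessing {desc} port 0x{port:X} - SUSPICIOUS")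
--
--     # Unknown port range
--     if is_microsoft_signed:
--         return (True, f"Microsoft driver accessing port 0x{port:X}")
--     else:
--         return (False, f"Untrusted driver accessing unknown port 0x{port:X} - SUSPICIOUS")
-- ===== SOURCE B (Python) =====
-- # Same answers as A via a presorted interval table + hand-written binary search
-- # (all ranges share the same allowed-signer list, so the table stores only desc).
-- _INTERVALS = sorted(
--     (s, e, desc)
--     for (s, e), (desc, _signers) in {
--         (0x0000, 0x00FF): ("Legacy DMA/PIC/PIT", ["Microsoft", "WHQL"]),
--         (0x0170, 0x0177): ("Secondary ATA", ["Microsoft", "WHQL"]),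
--         (0x01F0, 0x01F7): ("Primary ATA", ["Microsoft", "WHQL"]),
--         (0x0278, 0x027F): ("Parallel port 2", ["Microsoft", "WHQL"]),
--         (0x02F8, 0x02FF): ("Serial port 2", ["Microsoft", "WHQL"]),
--         (0x0378, 0x037F): ("Parallel port 1", ["Microsoft", "WHQL"]),
--         (0x03F8, 0x03FF): ("Serial port 1", ["Microsoft", "WHQL"]),
--         (0x0CF8, 0x0CFF): ("PCI configuration", ["Microsoft", "WHQL"]),
--         (0x0400, 0x04FF): ("ACPI PM", ["Microsoft", "WHQL"]),
--         (0x0500, 0x05FF): ("GPIO/ACPI", ["Microsoft", "WHQL"]),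
--     }.items()
-- )
-- _STARTS = [s for s, _, _ in _INTERVALS]
--
-- def is_legitimate_port_io(port, is_microsoft_signed, is_whql_signed):
--     # bisect_right over the sorted starts, written out by hand (A imports no bisect)
--     lo, hi = 0, len(_STARTS)
--     while lo < hi:
--         mid = (lo + hi) // 2
--         if port < _STARTS[mid]:
--             hi = mid
--         else:
--             lo = mid + 1
--     if lo > 0:
--         _s, end, desc = _INTERVALS[lo - 1]
--         if port <= end:
--             if is_microsoft_signed:
--                 return (True, f"Microsoft driver accessing {desc} port 0x{port:X}")
--             if is_whql_signed:
--                 return (True, f"WHQL driver accessing {desc} port 0x{port:X}")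
--             return (False, f"Untrusted driver accessing {desc} port 0x{port:X} - SUSPICIOUS")
--     if is_microsoft_signed:
--         return (True, f"Microsoft driver accessing port 0x{port:X}")
--     return (False, f"Untrusted driver accessing unknown port 0x{port:X} - SUSPICIOUS")
-- ===== Notes on version B (the rewrite author's own statement) =====
-- stated objective: alternative
-- what changed: Replaced the insertion-order linear scan over the ranges dict (with a per-range allowed-signers membership test) by a table of (start, end, desc) intervals presorted by start plus a hand-written bisect_right binary search over the starts; the found candidate's end bound then decides between the known-range and unknown-port messages.
import Mathlib
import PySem

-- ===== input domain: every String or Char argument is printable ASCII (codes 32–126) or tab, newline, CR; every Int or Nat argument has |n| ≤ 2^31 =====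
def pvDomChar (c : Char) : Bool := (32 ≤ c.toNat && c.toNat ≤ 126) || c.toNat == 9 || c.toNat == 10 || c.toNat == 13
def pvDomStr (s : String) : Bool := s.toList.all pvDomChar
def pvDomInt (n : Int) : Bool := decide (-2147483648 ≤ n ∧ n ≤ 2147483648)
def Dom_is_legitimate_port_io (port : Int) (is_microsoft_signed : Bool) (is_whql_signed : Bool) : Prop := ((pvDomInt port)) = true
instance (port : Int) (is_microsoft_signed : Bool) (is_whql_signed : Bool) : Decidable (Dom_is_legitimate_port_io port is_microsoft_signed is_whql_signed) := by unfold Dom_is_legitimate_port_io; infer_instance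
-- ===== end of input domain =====

-- B replaces A's insertion-order linear scan of the ranges dict by a presorted interval
-- table and a hand-written binary search on the starts (objective: alternative).

-- shared helper: exact port of Python's f"{n:X}" (uppercase hex, '-' prefix for negatives)
def pvHexDigitsAux : Nat → List Char → List Char
  | 0, acc => acc
  | n + 1, acc =>
    pvHexDigitsAux ((n + 1) / 16) ((Nat.digitChar ((n + 1) % 16)).toUpper :: acc)
decreasing_by exact Nat.div_lt_self (Nat.succ_pos n) (by omega)

def pvHexUpper (n : Int) : String :=
  if n < 0 then "-" ++ String.mk (pvHexDigitsAux (-n).toNat [])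
  else if n = 0 then "0"
  else String.mk (pvHexDigitsAux n.toNat [])

-- ===== PORT A =====
-- LEGITIMATE_PORT_RANGES in dict insertion order
def pvRangesA : List ((Int × Int) × (String × List String)) :=
  [ ((0x0000, 0x00FF), ("Legacy DMA/PIC/PIT", ["Microsoft", "WHQL"])),
    ((0x0170, 0x0177), ("Secondary ATA", ["Microsoft", "WHQL"])),
    ((0x01F0, 0x01F7), ("Primary ATA", ["Microsoft", "WHQL"])),
    ((0x0278, 0x027F), ("Parallel port 2", ["Microsoft", "WHQL"])),
    ((0x02F8, 0x02FF), ("Serial port 2", ["Microsoft", "WHQL"])),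
    ((0x0378, 0x037F), ("Parallel port 1", ["Microsoft", "WHQL"])),
    ((0x03F8, 0x03FF), ("Serial port 1", ["Microsoft", "WHQL"])),
    ((0x0CF8, 0x0CFF), ("PCI configuration", ["Microsoft", "WHQL"])),
    ((0x0400, 0x04FF), ("ACPI PM", ["Microsoft", "WHQL"])),
    ((0x0500, 0x05FF), ("GPIO/ACPI", ["Microsoft", "WHQL"])) ]

-- the for-loop with its early returns, then the unknown-port fallthrough
def pvScanA (port : Int) (is_microsoft_signed is_whql_signed : Bool) :
    List ((Int × Int) × (String × List String)) → Bool × String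
  | [] =>
    if is_microsoft_signed then
      (true, "Microsoft driver accessing port 0x" ++ pvHexUpper port)
    else
      (false, "Untrusted driver accessing unknown port 0x" ++ pvHexUpper port ++ " - SUSPICIOUS")
  | ((s, e), (desc, allowed)) :: rest =>
    if s ≤ port ∧ port ≤ e then
      if is_microsoft_signed && allowed.contains "Microsoft" then
        (true, "Microsoft driver accessing " ++ desc ++ " port 0x" ++ pvHexUpper port)
      else if is_whql_signed && allowed.contains "WHQL" then
        (true, "WHQL driver accessing " ++ desc ++ " port 0x" ++ pvHexUpper port)
      else
        (false, "Untrusted driver accessing " ++ desc ++ " port 0x" ++ pvHexUpper port ++ " - SUSPICIOUS")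
    else pvScanA port is_microsoft_signed is_whql_signed rest

def is_legitimate_port_io (port : Int) (is_microsoft_signed : Bool) (is_whql_signed : Bool) : Bool × String :=
  pvScanA port is_microsoft_signed is_whql_signed pvRangesA

-- ===== PORT B =====
-- _INTERVALS sorted by start; _STARTS
def pvIntervalsB : List (Int × Int × String) :=
  [ (0x0000, 0x00FF, "Legacy DMA/PIC/PIT"),
    (0x0170, 0x0177, "Secondary ATA"),
    (0x01F0, 0x01F7, "Primary ATA"),
    (0x0278, 0x027F, "Parallel port 2"),
    (0x02F8, 0x02FF, "Serial port 2"),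
    (0x0378, 0x037F, "Parallel port 1"),
    (0x03F8, 0x03FF, "Serial port 1"),
    (0x0400, 0x04FF, "ACPI PM"),
    (0x0500, 0x05FF, "GPIO/ACPI"),
    (0x0CF8, 0x0CFF, "PCI configuration") ]

def pvStartsB : List Int :=
  [0x0000, 0x0170, 0x01F0, 0x0278, 0x02F8, 0x0378, 0x03F8, 0x0400, 0x0500, 0x0CF8]

-- Source B's hand-written bisect_right loop (while lo < hi …)
def pvBisect (port : Int) (lo hi : Nat) : Nat :=
  if lo < hi then
    let mid := (lo + hi) / 2
    if port < pvStartsB.getD mid 0 then pvBisect port lo mid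
    else pvBisect port (mid + 1) hi
  else lo
termination_by hi - lo
decreasing_by all_goals omega

def is_legitimate_port_io_alt (port : Int) (is_microsoft_signed : Bool) (is_whql_signed : Bool) : Bool × String :=
  let lo := pvBisect port 0 pvStartsB.length
  if lo > 0 then
    -- _INTERVALS[lo - 1] (always in range when lo > 0; getD's default is never used)
    let t := pvIntervalsB.getD (lo - 1) (0, 0, "")
    if port ≤ t.2.1 then
      if is_microsoft_signed then
        (true, "Microsoft driver accessing " ++ t.2.2 ++ " port 0x" ++ pvHexUpper port)
      else if is_whql_signed then
        (true, "WHQL driver accessing " ++ t.2.2 ++ " port 0x" ++ pvHexUpper port)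
      else
        (false, "Untrusted driver accessing " ++ t.2.2 ++ " port 0x" ++ pvHexUpper port ++ " - SUSPICIOUS")
    else if is_microsoft_signed then
      (true, "Microsoft driver accessing port 0x" ++ pvHexUpper port)
    else
      (false, "Untrusted driver accessing unknown port 0x" ++ pvHexUpper port ++ " - SUSPICIOUS")
  else if is_microsoft_signed then
    (true, "Microsoft driver accessing port 0x" ++ pvHexUpper port)
  else
    (false, "Untrusted driver accessing unknown port 0x" ++ pvHexUpper port ++ " - SUSPICIOUS")

-- ===== PRECONDITION & SPEC =====
def Spec_is_legitimate_port_io (port : Int) (is_microsoft_signed : Bool) (is_whql_signed : Bool) (out : Bool × String) : Prop := out = is_legitimate_port_io_alt port is_microsoft_signed is_whql_signed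
instance (port : Int) (is_microsoft_signed : Bool) (is_whql_signed : Bool) (out : Bool × String) : Decidable (Spec_is_legitimate_port_io port is_microsoft_signed is_whql_signed out) := by unfold Spec_is_legitimate_port_io; infer_instance

-- ===== CLAIM (what is proved, stated in full; the proofs are below) =====
def Claim_equal_is_legitimate_port_io : Prop := ∀ (port : Int) (is_microsoft_signed : Bool) (is_whql_signed : Bool), Dom_is_legitimate_port_io port is_microsoft_signed is_whql_signed → Spec_is_legitimate_port_io port is_microsoft_signed is_whql_signed (is_legitimate_port_io port is_microsoft_signed is_whql_signed)

-- ===== LEMMAS AND PROOFS =====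

-- proof-only helpers: a common normal form both ports are reduced to
def pvKnown (port : Int) (m w : Bool) (d : String) : Bool × String :=
  if m then (true, "Microsoft driver accessing " ++ d ++ " port 0x" ++ pvHexUpper port)
  else if w then (true, "WHQL driver accessing " ++ d ++ " port 0x" ++ pvHexUpper port)
  else (false, "Untrusted driver accessing " ++ d ++ " port 0x" ++ pvHexUpper port ++ " - SUSPICIOUS")

def pvUnknown (port : Int) (m : Bool) : Bool × String :=
  if m then (true, "Microsoft driver accessing port 0x" ++ pvHexUpper port)
  else (false, "Untrusted driver accessing unknown port 0x" ++ pvHexUpper port ++ " - SUSPICIOUS")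

def pvCanon (port : Int) (m w : Bool) : Bool × String :=
  if 0x0000 ≤ port ∧ port ≤ 0x00FF then pvKnown port m w "Legacy DMA/PIC/PIT"
  else if 0x0170 ≤ port ∧ port ≤ 0x0177 then pvKnown port m w "Secondary ATA"
  else if 0x01F0 ≤ port ∧ port ≤ 0x01F7 then pvKnown port m w "Primary ATA"
  else if 0x0278 ≤ port ∧ port ≤ 0x027F then pvKnown port m w "Parallel port 2"
  else if 0x02F8 ≤ port ∧ port ≤ 0x02FF then pvKnown port m w "Serial port 2"
  else if 0x0378 ≤ port ∧ port ≤ 0x037F then pvKnown port m w "Parallel port 1"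
  else if 0x03F8 ≤ port ∧ port ≤ 0x03FF then pvKnown port m w "Serial port 1"
  else if 0x0CF8 ≤ port ∧ port ≤ 0x0CFF then pvKnown port m w "PCI configuration"
  else if 0x0400 ≤ port ∧ port ≤ 0x04FF then pvKnown port m w "ACPI PM"
  else if 0x0500 ≤ port ∧ port ≤ 0x05FF then pvKnown port m w "GPIO/ACPI"
  else pvUnknown port m

set_option maxRecDepth 8192 in
set_option maxHeartbeats 1000000 in
theorem pvBisect_eval (port : Int) :
    pvBisect port 0 10 =
      if port < 0x0000 then 0 else if port < 0x0170 then 1 else if port < 0x01F0 then 2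
      else if port < 0x0278 then 3 else if port < 0x02F8 then 4 else if port < 0x0378 then 5
      else if port < 0x03F8 then 6 else if port < 0x0400 then 7 else if port < 0x0500 then 8
      else if port < 0x0CF8 then 9 else 10 := by
  unfold pvBisect
  norm_num [pvStartsB]
  try unfold pvBisect
  try norm_num [pvStartsB]
  try unfold pvBisect
  try norm_num [pvStartsB]
  try unfold pvBisect
  try norm_num [pvStartsB]
  try unfold pvBisect
  try norm_num [pvStartsB]
  split_ifs <;> omega

set_option maxRecDepth 8192 in
set_option maxHeartbeats 2000000 in
theorem pvA_eval (port : Int) (m w : Bool) :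
    is_legitimate_port_io port m w = pvCanon port m w := by
  have hM : (["Microsoft", "WHQL"]).contains "Microsoft" = true := rfl
  have hW : (["Microsoft", "WHQL"]).contains "WHQL" = true := rfl
  simp only [is_legitimate_port_io, pvScanA, pvRangesA, pvCanon, pvKnown, pvUnknown, hM, hW,
    Bool.and_true]

set_option maxRecDepth 8192 in
set_option maxHeartbeats 40000000 in
theorem pvB_eval (port : Int) (m w : Bool) :
    is_legitimate_port_io_alt port m w = pvCanon port m w := by
  unfold is_legitimate_port_io_alt
  have hlen : pvStartsB.length = 10 := by rfl
  rw [hlen, pvBisect_eval]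
  by_cases h0 : port < 0
  · have hlo : (if port < 0 then 0 else if port < 368 then 1 else if port < 496 then 2 else if port < 632 then 3 else if port < 760 then 4 else if port < 888 then 5 else if port < 1016 then 6 else if port < 1024 then 7 else if port < 1280 then 8 else if port < 3320 then 9 else 10 : Nat) = 0 := by split_ifs <;> omega
    rw [hlo]
    trans pvUnknown port m
    · norm_num [pvUnknown]
    · simp only [pvCanon]
      split_ifs <;> first | rfl | omega
  · by_cases h1 : port < 368
    · have hlo : (if port < 0 then 0 else if port < 368 then 1 else if port < 496 then 2 else if port < 632 then 3 else if port < 760 then 4 else if port < 888 then 5 else if port < 1016 then 6 else if port < 1024 then 7 else if port < 1280 then 8 else if port < 3320 then 9 else 10 : Nat) = 1 := by split_ifs <;> omega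
      rw [hlo]
      by_cases hE : port ≤ 255
      · trans pvKnown port m w "Legacy DMA/PIC/PIT"
        · norm_num [pvIntervalsB, pvKnown]
          split_ifs <;> first | rfl | omega
        · simp only [pvCanon]
          split_ifs <;> first | rfl | omega
      · trans pvUnknown port m
        · norm_num [pvIntervalsB, pvUnknown]
          split_ifs <;> first | rfl | omega
        · simp only [pvCanon]
          split_ifs <;> first | rfl | omega
    · by_cases h2 : port < 496
      · have hlo : (if port < 0 then 0 else if port < 368 then 1 else if port < 496 then 2 else if port < 632 then 3 else if port < 760 then 4 else if port < 888 then 5 else if port < 1016 then 6 else if port < 1024 then 7 else if port < 1280 then 8 else if port < 3320 then 9 else 10 : Nat) = 2 := by split_ifs <;> omega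
        rw [hlo]
        by_cases hE : port ≤ 375
        · trans pvKnown port m w "Secondary ATA"
          · norm_num [pvIntervalsB, pvKnown]
            split_ifs <;> first | rfl | omega
          · simp only [pvCanon]
            split_ifs <;> first | rfl | omega
        · trans pvUnknown port m
          · norm_num [pvIntervalsB, pvUnknown]
            split_ifs <;> first | rfl | omega
          · simp only [pvCanon]
            split_ifs <;> first | rfl | omega
      · by_cases h3 : port < 632
        · have hlo : (if port < 0 then 0 else if port < 368 then 1 else if port < 496 then 2 else if port < 632 then 3 else if port < 760 then 4 else if port < 888 then 5 else if port < 1016 then 6 else if port < 1024 then 7 else if port < 1280 then 8 else if port < 3320 then 9 else 10 : Nat) = 3 := by split_ifs <;> omega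
          rw [hlo]
          by_cases hE : port ≤ 503
          · trans pvKnown port m w "Primary ATA"
            · norm_num [pvIntervalsB, pvKnown]
              split_ifs <;> first | rfl | omega
            · simp only [pvCanon]
              split_ifs <;> first | rfl | omega
          · trans pvUnknown port m
            · norm_num [pvIntervalsB, pvUnknown]
              split_ifs <;> first | rfl | omega
            · simp only [pvCanon]
              split_ifs <;> first | rfl | omega
        · by_cases h4 : port < 760
          · have hlo : (if port < 0 then 0 else if port < 368 then 1 else if port < 496 then 2 else if port < 632 then 3 else if port < 760 then 4 else if port < 888 then 5 else if port < 1016 then 6 else if port < 1024 then 7 else if port < 1280 then 8 else if port < 3320 then 9 else 10 : Nat) = 4 := by split_ifs <;> omega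
            rw [hlo]
            by_cases hE : port ≤ 639
            · trans pvKnown port m w "Parallel port 2"
              · norm_num [pvIntervalsB, pvKnown]
                split_ifs <;> first | rfl | omega
              · simp only [pvCanon]
                split_ifs <;> first | rfl | omega
            · trans pvUnknown port m
              · norm_num [pvIntervalsB, pvUnknown]
                split_ifs <;> first | rfl | omega
              · simp only [pvCanon]
                split_ifs <;> first | rfl | omega
          · by_cases h5 : port < 888
            · have hlo : (if port < 0 then 0 else if port < 368 then 1 else if port < 496 then 2 else if port < 632 then 3 else if port < 760 then 4 else if port < 888 then 5 else if port < 1016 then 6 else if port < 1024 then 7 else if port < 1280 then 8 else if port < 3320 then 9 else 10 : Nat) = 5 := by split_ifs <;> omega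
              rw [hlo]
              by_cases hE : port ≤ 767
              · trans pvKnown port m w "Serial port 2"
                · norm_num [pvIntervalsB, pvKnown]
                  split_ifs <;> first | rfl | omega
                · simp only [pvCanon]
                  split_ifs <;> first | rfl | omega
              · trans pvUnknown port m
                · norm_num [pvIntervalsB, pvUnknown]
                  split_ifs <;> first | rfl | omega
                · simp only [pvCanon]
                  split_ifs <;> first | rfl | omega
            · by_cases h6 : port < 1016
              · have hlo : (if port < 0 then 0 else if port < 368 then 1 else if port < 496 then 2 else if port < 632 then 3 else if port < 760 then 4 else if port < 888 then 5 else if port < 1016 then 6 else if port < 1024 then 7 else if port < 1280 then 8 else if port < 3320 then 9 else 10 : Nat) = 6 := by split_ifs <;> omega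
                rw [hlo]
                by_cases hE : port ≤ 895
                · trans pvKnown port m w "Parallel port 1"
                  · norm_num [pvIntervalsB, pvKnown]
                    split_ifs <;> first | rfl | omega
                  · simp only [pvCanon]
                    split_ifs <;> first | rfl | omega
                · trans pvUnknown port m
                  · norm_num [pvIntervalsB, pvUnknown]
                    split_ifs <;> first | rfl | omega
                  · simp only [pvCanon]
                    split_ifs <;> first | rfl | omega
              · by_cases h7 : port < 1024
                · have hlo : (if port < 0 then 0 else if port < 368 then 1 else if port < 496 then 2 else if port < 632 then 3 else if port < 760 then 4 else if port < 888 then 5 else if port < 1016 then 6 else if port < 1024 then 7 else if port < 1280 then 8 else if port < 3320 then 9 else 10 : Nat) = 7 := by split_ifs <;> omega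
                  rw [hlo]
                  by_cases hE : port ≤ 1023
                  · trans pvKnown port m w "Serial port 1"
                    · norm_num [pvIntervalsB, pvKnown]
                      split_ifs <;> first | rfl | omega
                    · simp only [pvCanon]
                      split_ifs <;> first | rfl | omega
                  · trans pvUnknown port m
                    · norm_num [pvIntervalsB, pvUnknown]
                      split_ifs <;> first | rfl | omega
                    · simp only [pvCanon]
                      split_ifs <;> first | rfl | omega
                · by_cases h8 : port < 1280
                  · have hlo : (if port < 0 then 0 else if port < 368 then 1 else if port < 496 then 2 else if port < 632 then 3 else if port < 760 then 4 else if port < 888 then 5 else if port < 1016 then 6 else if port < 1024 then 7 else if port < 1280 then 8 else if port < 3320 then 9 else 10 : Nat) = 8 := by split_ifs <;> omega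
                    rw [hlo]
                    by_cases hE : port ≤ 1279
                    · trans pvKnown port m w "ACPI PM"
                      · norm_num [pvIntervalsB, pvKnown]
                        split_ifs <;> first | rfl | omega
                      · simp only [pvCanon]
                        split_ifs <;> first | rfl | omega
                    · trans pvUnknown port m
                      · norm_num [pvIntervalsB, pvUnknown]
                        split_ifs <;> first | rfl | omega
                      · simp only [pvCanon]
                        split_ifs <;> first | rfl | omega
                  · by_cases h9 : port < 3320
                    · have hlo : (if port < 0 then 0 else if port < 368 then 1 else if port < 496 then 2 else if port < 632 then 3 else if port < 760 then 4 else if port < 888 then 5 else if port < 1016 then 6 else if port < 1024 then 7 else if port < 1280 then 8 else if port < 3320 then 9 else 10 : Nat) = 9 := by split_ifs <;> omega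
                      rw [hlo]
                      by_cases hE : port ≤ 1535
                      · trans pvKnown port m w "GPIO/ACPI"
                        · norm_num [pvIntervalsB, pvKnown]
                          split_ifs <;> first | rfl | omega
                        · simp only [pvCanon]
                          split_ifs <;> first | rfl | omega
                      · trans pvUnknown port m
                        · norm_num [pvIntervalsB, pvUnknown]
                          split_ifs <;> first | rfl | omega
                        · simp only [pvCanon]
                          split_ifs <;> first | rfl | omega
                    · have hlo : (if port < 0 then 0 else if port < 368 then 1 else if port < 496 then 2 else if port < 632 then 3 else if port < 760 then 4 else if port < 888 then 5 else if port < 1016 then 6 else if port < 1024 then 7 else if port < 1280 then 8 else if port < 3320 then 9 else 10 : Nat) = 10 := by split_ifs <;> omega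
                      rw [hlo]
                      by_cases hE : port ≤ 3327
                      · trans pvKnown port m w "PCI configuration"
                        · norm_num [pvIntervalsB, pvKnown]
                          split_ifs <;> first | rfl | omega
                        · simp only [pvCanon]
                          split_ifs <;> first | rfl | omega
                      · trans pvUnknown port m
                        · norm_num [pvIntervalsB, pvUnknown]
                          split_ifs <;> first | rfl | omega
                        · simp only [pvCanon]
                          split_ifs <;> first | rfl | omega

-- ===== VERDICT (by name: the statement is the Claim_ definition above) =====
theorem is_legitimate_port_io_spec : Claim_equal_is_legitimate_port_io := by
  intro port m w _
  unfold Spec_is_legitimate_port_io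
  rw [pvA_eval, pvB_eval]
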